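-- pv_equiv track=rewrite | github.com/SouthwestCCDC/vyos-onecontext | src/vyos_onecontext/parser.py | _find_closing_quote
-- ===== SOURCE A (Python) =====
-- def _find_closing_quote(text: str, quote: str) -> int | None:
--     """Find the closing quote position, accounting for escape sequences.
--
--     Args:
--         text: Text to search for closing quote
--         quote: Quote character to search for (" or ')
--
--     Returns:
--         Index of closing quote, or None if not found
--     """
--     i = 0
--     while i < len(text):
--         if text[i] == "\\":
--             # Skip escaped character (with bounds check)
--             if i + 1 < len(text):
--                 i += 2
--             else:
--                 # Trailing backslash, move past it
--                 i += 1
--         elif text[i] == quote: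
--             return i
--         else:
--             i += 1
--     return None
-- ===== SOURCE B (Python) =====
-- def _find_closing_quote(text: str, quote: str) -> int | None:
--     # Candidate-scan by backslash-run parity: jump between occurrences of the
--     # quote with str.find and accept the first one preceded by an even number
--     # of consecutive backslashes. The escape character itself can never be a
--     # quote, and a quote is a single character.
--     if len(quote) != 1 or quote == "\\":
--         return None
--     j = text.find(quote)
--     while j != -1:
--         k = j
--         while k > 0 and text[k - 1] == "\\":
--             k -= 1
--         if (j - k) % 2 == 0:
--             return j
--         j = text.find(quote, j + 1)
--     return None
-- ===== Notes on version B (the rewrite author's own statement) =====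
-- stated objective: faster
-- what changed: Instead of a character-by-character scan that jumps over escape pairs, B hops between occurrences of the quote with str.find and accepts the first occurrence preceded by an even number of consecutive backslashes (run-parity test), after rejecting non-single-character or backslash quotes up front.
import Mathlib
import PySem

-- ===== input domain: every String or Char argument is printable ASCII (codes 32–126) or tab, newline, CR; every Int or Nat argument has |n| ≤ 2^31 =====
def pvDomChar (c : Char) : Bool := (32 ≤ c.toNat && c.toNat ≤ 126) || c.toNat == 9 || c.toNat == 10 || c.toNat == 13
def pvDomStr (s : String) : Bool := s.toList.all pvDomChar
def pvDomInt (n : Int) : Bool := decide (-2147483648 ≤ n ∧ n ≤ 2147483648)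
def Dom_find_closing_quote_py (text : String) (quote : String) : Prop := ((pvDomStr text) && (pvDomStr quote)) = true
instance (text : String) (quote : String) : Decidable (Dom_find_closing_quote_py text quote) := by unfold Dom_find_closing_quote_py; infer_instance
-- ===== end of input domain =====

-- B replaces A's escape-jumping scan by hopping between quote occurrences (str.find)
-- and accepting the first one preceded by an even backslash run (return value only; both are pure).
-- ===== PORT A =====
-- A's while loop: index i advances by 2 over an escape pair (or by 1 past a trailing backslash), by 1 otherwise.
def findA (cs : List Char) (quote : String) (i : Nat) : Option Int :=
  if h : i < cs.length then
    if cs[i] = '\\' then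
      if i + 1 < cs.length then findA cs quote (i + 2)
      else findA cs quote (i + 1)
    else if String.ofList [cs[i]] = quote then some (i : Int)
    else findA cs quote (i + 1)
  else none
termination_by cs.length - i

def find_closing_quote_py (text : String) (quote : String) : Option Int :=
  findA text.toList quote 0

-- ===== PORT B =====
-- Source B's `text.find(quote, start)`: first index ≥ start where the quote occurs.
-- Exact for the single-character quotes on which this code path is reached
-- (Source B returns None before any find when len(quote) ≠ 1).
def findFrom (cs : List Char) (quote : String) (start : Nat) : Option Nat :=
  if h : start < cs.length then
    if String.ofList [cs[start]] = quote then some start else findFrom cs quote (start + 1)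
  else none
termination_by cs.length - start

-- Source B's inner `while k > 0 and text[k-1] == "\\": k -= 1`.
def runDown (cs : List Char) (k : Nat) : Nat :=
  if 0 < k ∧ cs[k - 1]? = some '\\' then runDown cs (k - 1) else k
termination_by k
decreasing_by omega

-- needed only for the termination of loopB (cited in its decreasing_by)
theorem findFrom_bounds (cs : List Char) (quote : String) (start : Nat) (r : Nat)
    (h : findFrom cs quote start = some r) : start ≤ r ∧ r < cs.length := by
  induction hk : cs.length - start using Nat.strong_induction_on generalizing start with
  | _ k ih =>
  subst hk
  rw [findFrom] at h
  split at h
  · split at h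
    · cases h; omega
    · have := ih _ (by omega) _ h rfl; omega
  · exact absurd h (by simp)

-- Source B's outer while loop over successive find results (-1 ↔ none); the
-- `hj : j < cs.length` test only makes the recursion total — every value
-- actually passed in comes from findFrom and satisfies it.
def loopB (cs : List Char) (quote : String) (o : Option Nat) : Option Int :=
  match o with
  | none => none
  | some j =>
    if hj : j < cs.length then
      if (j - runDown cs j) % 2 = 0 then some (j : Int)
      else loopB cs quote (findFrom cs quote (j + 1))
    else none
termination_by match o with | none => 0 | some j => cs.length + 1 - j
decreasing_by
  cases h : findFrom cs quote (j + 1) with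
  | none => simpa [h] using by omega
  | some r => have := findFrom_bounds cs quote (j + 1) r h; simpa [h] using by omega

def find_closing_quote_py_alt (text : String) (quote : String) : Option Int :=
  if PySem.Str.len quote ≠ 1 ∨ quote = "\\" then none
  else loopB text.toList quote (findFrom text.toList quote 0)

-- ===== PRECONDITION & SPEC =====
def Spec_find_closing_quote_py (text : String) (quote : String) (out : Option Int) : Prop := out = find_closing_quote_py_alt text quote
instance (text : String) (quote : String) (out : Option Int) : Decidable (Spec_find_closing_quote_py text quote out) := by unfold Spec_find_closing_quote_py; infer_instance

-- ===== CLAIM =====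
def Claim_equal_find_closing_quote_py : Prop := ∀ (text : String) (quote : String), Dom_find_closing_quote_py text quote → Spec_find_closing_quote_py text quote (find_closing_quote_py text quote)

-- ===== LEMMAS AND PROOFS =====

theorem runDown_le (cs : List Char) (k : Nat) : runDown cs k ≤ k := by
  induction k using Nat.strong_induction_on with
  | _ k ih =>
  rw [runDown]
  split
  · rename_i h; exact le_trans (ih _ (by omega)) (by omega)
  · exact le_rfl

theorem runDown_zero (cs : List Char) : runDown cs 0 = 0 := by
  rw [runDown]; simp

theorem runDown_succ_not_bs (cs : List Char) (i : Nat) (h : cs[i]? ≠ some '\\') :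
    runDown cs (i + 1) = i + 1 := by
  rw [runDown]; simp [h]

theorem runDown_succ_bs (cs : List Char) (i : Nat) (h : cs[i]? = some '\\') :
    runDown cs (i + 1) = runDown cs i := by
  rw [runDown]; simp [h]

theorem ofList_singleton_eq_backslash (c : Char) (h : String.ofList [c] = "\\") : c = '\\' := by
  have h2 := congrArg String.toList h
  simpa using h2

theorem findA_none (cs : List Char) (quote : String)
    (hq : PySem.Str.len quote ≠ 1 ∨ quote = "\\") (i : Nat) :
    findA cs quote i = none := by
  induction hk : cs.length - i using Nat.strong_induction_on generalizing i with
  | _ k ih =>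
  subst hk
  rw [findA]
  split
  · rename_i hi
    split
    · split
      · exact ih _ (by omega) _ rfl
      · exact ih _ (by omega) _ rfl
    · rename_i hbs
      rw [if_neg, ih _ (by omega) _ rfl]
      intro hmk
      rcases hq with hq | hq
      · apply hq; rw [← hmk]; simp [PySem.Str.len_eq]
      · exact hbs (ofList_singleton_eq_backslash _ (hq ▸ hmk))
  · rfl

-- Main invariant: when the backslash run ending just before i is even, A's scan
-- from i equals B's candidate loop started at the first quote occurrence ≥ i.
theorem findA_eq_loopB (cs : List Char) (quote : String) (hq : quote ≠ "\\") (i : Nat)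
    (heven : (i - runDown cs i) % 2 = 0) :
    findA cs quote i = loopB cs quote (findFrom cs quote i) := by
  induction hk : cs.length - i using Nat.strong_induction_on generalizing i with
  | _ k ih =>
  subst hk
  by_cases hi : i < cs.length
  · rw [findA, dif_pos hi]
    by_cases hbs : cs[i] = '\\'
    · have hqm : ¬ String.ofList [cs[i]] = quote := by
        intro h; exact hq (by rw [← h, hbs])
      have hff : findFrom cs quote i = findFrom cs quote (i + 1) := by
        rw [findFrom, dif_pos hi, if_neg hqm]
      rw [if_pos hbs]
      by_cases h1 : i + 1 < cs.length
      · rw [if_pos h1]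
        -- run before i+1 is odd; run before i+2 is even again
        have hrd1 : runDown cs (i + 1) = runDown cs i :=
          runDown_succ_bs cs i (by simp [List.getElem?_eq_getElem hi, hbs])
        have hle : runDown cs i ≤ i := runDown_le cs i
        have hodd : (i + 1 - runDown cs (i + 1)) % 2 = 1 := by rw [hrd1]; omega
        have heven2 : (i + 2 - runDown cs (i + 2)) % 2 = 0 := by
          by_cases h2 : cs[i + 1]? = some '\\'
          · rw [runDown_succ_bs cs (i + 1) h2, hrd1]; omega
          · rw [runDown_succ_not_bs cs (i + 1) h2]; omega
        rw [ih _ (by omega) _ heven2 rfl, hff]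
        by_cases hm : String.ofList [cs[i + 1]] = quote
        · -- the candidate at i+1 is escaped (odd run): loopB skips it
          have : findFrom cs quote (i + 1) = some (i + 1) := by
            rw [findFrom, dif_pos h1, if_pos hm]
          rw [this, loopB, dif_pos h1, if_neg (by omega)]
        · have : findFrom cs quote (i + 1) = findFrom cs quote (i + 2) := by
            rw [findFrom, dif_pos h1, if_neg hm]
          rw [this]
      · rw [if_neg h1]
        have hff1 : findFrom cs quote (i + 1) = none := by
          rw [findFrom, dif_neg h1]
        rw [findA, dif_neg h1, hff, hff1, loopB]
    · rw [if_neg hbs]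
      by_cases hm : String.ofList [cs[i]] = quote
      · rw [if_pos hm]
        have : findFrom cs quote i = some i := by
          rw [findFrom, dif_pos hi, if_pos hm]
        rw [this, loopB, dif_pos hi, if_pos heven]
      · rw [if_neg hm]
        have hff : findFrom cs quote i = findFrom cs quote (i + 1) := by
          rw [findFrom, dif_pos hi, if_neg hm]
        have heven1 : (i + 1 - runDown cs (i + 1)) % 2 = 0 := by
          rw [runDown_succ_not_bs cs i (by simp [List.getElem?_eq_getElem hi, hbs])]; omega
        rw [ih _ (by omega) _ heven1 rfl, hff]
  · have hff : findFrom cs quote i = none := by rw [findFrom, dif_neg hi]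
    rw [findA, dif_neg hi, hff, loopB]

-- ===== VERDICT =====
theorem find_closing_quote_py_spec : Claim_equal_find_closing_quote_py := by
  intro text quote _
  unfold Spec_find_closing_quote_py find_closing_quote_py find_closing_quote_py_alt
  split
  · rename_i hg
    exact findA_none text.toList quote (by tauto) 0
  · rename_i hg
    push Not at hg
    exact findA_eq_loopB text.toList quote hg.2 0 (by rw [runDown_zero])
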